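-- pv_equiv track=rewrite | github.com/abettucci/data_structures_subject | Clases/TP10 Dictionaries/tp10ej4.py | depurarComponentes
-- ===== SOURCE A (Python) =====
-- def depurarComponentes(colores):
--     coloresComponentes = []
--     componentes = colores.split(',')
--     resultado = componentes[0]
--     diccionario = dict()
--
--     for i in range(len(componentes)-1):
--         coloresComponentes.append(componentes[i+1].lstrip())
--     for color in range(len(coloresComponentes)):
--         if coloresComponentes[color] != resultado.split('-')[1]:
--             diccionario[resultado] = coloresComponentes[color]
--     return diccionario
-- ===== SOURCE B (Python) =====
-- def depurarComponentes(colores):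
--     componentes = colores.split(',')
--     rest = [c.lstrip() for c in componentes[1:]]
--     if not rest:
--         return {}
--     key = componentes[0].split('-')[1]
--     for c in reversed(rest):
--         if c != key:
--             return {componentes[0]: c}
--     return {}
-- ===== Notes on version B (the rewrite author's own statement) =====
-- stated objective: simpler
-- what changed: B replaces A's two index loops and repeated dict overwriting with one reverse scan of the stripped tail for the last component differing from the key, returning the at-most-one-entry dict directly (and {} immediately when there is no tail).
import Mathlib
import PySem

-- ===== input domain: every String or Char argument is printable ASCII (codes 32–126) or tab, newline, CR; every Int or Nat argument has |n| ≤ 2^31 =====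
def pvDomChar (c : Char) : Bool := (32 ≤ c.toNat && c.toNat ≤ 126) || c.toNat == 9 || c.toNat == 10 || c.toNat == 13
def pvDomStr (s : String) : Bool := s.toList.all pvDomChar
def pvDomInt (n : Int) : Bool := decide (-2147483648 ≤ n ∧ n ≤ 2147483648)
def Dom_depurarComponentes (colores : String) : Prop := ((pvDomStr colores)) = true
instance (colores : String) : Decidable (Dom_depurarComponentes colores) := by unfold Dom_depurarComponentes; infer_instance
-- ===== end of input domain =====

-- B returns the single-key dict by one reverse scan for the last differing component instead of A's
-- index loops and repeated dict overwriting (objective: simpler; same asymptotic cost).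

-- s.split(sep) for a non-empty literal separator (PySem.Str.split? is none only for sep = "")
def pySplit (s sep : String) : List String := (PySem.Str.split? s sep).getD []

-- ===== PORT A =====
def depurarComponentes (colores : String) : List (String × String) :=
  let componentes := pySplit colores ","
  let resultado := PySem.List.pyGetD componentes 0 ""
  -- first loop: for i in range(len(componentes)-1): coloresComponentes.append(componentes[i+1].lstrip())
  let coloresComponentes :=
    (PySem.List.pyRange 0 ((componentes.length : Int) - 1) 1).foldl
      (fun acc i => acc ++ [PySem.Str.lstrip (PySem.List.pyGetD componentes (i + 1) "")]) []
  -- second loop: for color in range(len(coloresComponentes)): overwrite diccionario[resultado]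
  -- (resultado.split('-')[1] ported with pyGetD; outside Pre_ the Python raises IndexError here)
  let diccionario :=
    (PySem.List.pyRange 0 ((coloresComponentes.length : Int)) 1).foldl
      (fun d color =>
        let c := PySem.List.pyGetD coloresComponentes color ""
        if c ≠ PySem.List.pyGetD (pySplit resultado "-") 1 "" then
          d.insert resultado c
        else d)
      (PySem.Dict.empty : PySem.Dict String String)
  diccionario.items

-- ===== PORT B =====
def depurarComponentes_alt (colores : String) : List (String × String) :=
  let componentes := pySplit colores ","
  let rest := (PySem.List.slice componentes (some 1) none).map PySem.Str.lstrip
  if rest.isEmpty then []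
  else
    let first := PySem.List.pyGetD componentes 0 ""
    -- componentes[0].split('-')[1]; outside Pre_ the Python raises IndexError here
    let key := PySem.List.pyGetD (pySplit first "-") 1 ""
    match rest.reverse.find? (fun c => decide (c ≠ key)) with
    | some c => [(first, c)]
    | none => []

-- ===== PRECONDITION & SPEC =====
-- Pre_ excludes exactly the inputs where the Python raises IndexError: more than one
-- comma-component while the first component contains no hyphen (A and B both raise there).
def Pre_depurarComponentes (colores : String) : Prop :=
  (pySplit colores ",").length = 1 ∨
    PySem.Str.isIn "-" ((pySplit colores ",").headD "") = true
instance (colores : String) : Decidable (Pre_depurarComponentes colores) := by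
  unfold Pre_depurarComponentes; infer_instance
def pvWitness_depurarComponentes : String := "rojo-azul, verde, gris"

def Spec_depurarComponentes (colores : String) (out : List (String × String)) : Prop := out = depurarComponentes_alt colores
instance (colores : String) (out : List (String × String)) : Decidable (Spec_depurarComponentes colores out) := by unfold Spec_depurarComponentes; infer_instance

-- ===== CLAIM (what is proved, stated in full; the proofs are below) =====
def Claim_equal_depurarComponentes : Prop := ∀ (colores : String), Dom_depurarComponentes colores → Pre_depurarComponentes colores → Spec_depurarComponentes colores (depurarComponentes colores)

-- ===== LEMMAS AND PROOFS =====

-- A's overwrite loop starting from a one-entry dict {k: v}: the final dict maps k to the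
-- last differing element (found by B as the first hit of find? on the reversed list).
theorem foldA_ins (cc : List String) (k key v : String) (d : PySem.Dict String String) :
    cc.foldl (fun d c => if c ≠ key then d.insert k c else d) (d.insert k v)
      = d.insert k ((cc.reverse.find? (fun c => decide (c ≠ key))).getD v) := by
  induction cc generalizing v with
  | nil => simp
  | cons c cc ih =>
    rw [List.foldl_cons, List.reverse_cons, List.find?_append]
    by_cases h : c = key
    · rw [if_neg (by simp [h]), ih]
      cases hf : cc.reverse.find? (fun c => decide (c ≠ key)) <;> simp [h]
    · rw [if_pos h, PySem.Dict.insert_insert_self, ih]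
      cases hf : cc.reverse.find? (fun c => decide (c ≠ key)) <;> simp [h]

theorem foldA_empty (cc : List String) (k key : String) :
    (cc.foldl (fun d c => if c ≠ key then d.insert k c else d)
        (PySem.Dict.empty : PySem.Dict String String)).items
      = match cc.reverse.find? (fun c => decide (c ≠ key)) with
        | some c => [(k, c)]
        | none => [] := by
  induction cc with
  | nil => simp [PySem.Dict.empty]
  | cons c cc ih =>
    rw [List.foldl_cons, List.reverse_cons, List.find?_append]
    by_cases h : c = key
    · rw [if_neg (by simp [h]), ih]
      cases hf : cc.reverse.find? (fun c => decide (c ≠ key)) <;> simp [h]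
    · rw [if_pos h, foldA_ins]
      cases hf : cc.reverse.find? (fun c => decide (c ≠ key)) <;>
        simp [h, PySem.Dict.empty, PySem.Dict.insert]

-- A's first loop builds (componentes.drop 1).map lstrip.
theorem firstLoop_eq (xs : List String) :
    (PySem.List.pyRange 0 ((xs.length : Int) - 1) 1).foldl
      (fun acc i => acc ++ [PySem.Str.lstrip (PySem.List.pyGetD xs (i + 1) "")]) []
      = (xs.drop 1).map PySem.Str.lstrip := by
  rw [PySem.List.foldl_append_singleton_eq_map]
  have h3 : (PySem.List.pyRange 1 ((xs.length : Int)) 1).map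
      (fun j => PySem.Str.lstrip (PySem.List.pyGetD xs j "")) = (xs.drop 1).map PySem.Str.lstrip := by
    have h := PySem.List.map_pyGetD_pyRange' xs "" (a := 1) (by norm_num)
    norm_num at h
    rw [List.drop_one, ← h, List.map_map]
    rfl
  rw [← h3, PySem.List.pyRange_one 1 (xs.length : Int), PySem.List.pyRange_one 0 ((xs.length : Int) - 1),
    List.map_map, List.map_map, List.nil_append]
  have hn : ((xs.length : Int) - 1 - 0).toNat = ((xs.length : Int) - 1).toNat := by omega
  rw [hn]
  apply List.map_congr_left
  intro k _
  simp only [Function.comp]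
  rw [show ((0:Int) + (k:Int) + 1) = 1 + (k:Int) by ring]

-- ===== VERDICT (by name: the statement is the Claim_ definition above) =====
theorem depurarComponentes_spec : Claim_equal_depurarComponentes := by
  intro colores _dom _pre
  unfold Spec_depurarComponentes depurarComponentes depurarComponentes_alt
  simp only []
  rw [firstLoop_eq]
  rw [PySem.List.foldl_pyRange_zero_pyGetD'
        (((pySplit colores ",").drop 1).map PySem.Str.lstrip) ""
        (fun d c =>
          if c ≠ PySem.List.pyGetD (pySplit (PySem.List.pyGetD (pySplit colores ",") 0 "") "-") 1 "" then
            d.insert (PySem.List.pyGetD (pySplit colores ",") 0 "") c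
          else d)
        PySem.Dict.empty]
  rw [foldA_empty]
  rw [PySem.List.slice_from _ (by norm_num)]
  rw [show ((1:Int)).toNat = 1 from rfl]
  cases hrest : ((pySplit colores ",").drop 1).map PySem.Str.lstrip with
  | nil => rfl
  | cons r rs => rfl
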